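-- pv_equiv track=rewrite | github.com/Gopichand-28/codemind-python | Spy_Number.py | spy_number_check
-- ===== SOURCE A (Python) =====
-- def spy_number_check(num):
--     y=0
--     d=1
--     while num>0:
--         s=num%10
--         y=s+y
--         d=d*s
--         num=num//10
--     if y==d:
--         return True
--     else:
--         return False
-- ===== SOURCE B (Python) =====
-- def spy_number_check(num):
--     if num <= 0:
--         return False
--     s = str(num)
--     total = sum(int(c) for c in s)
--     prod = 1
--     for c in s:
--         prod *= int(c)
--     return total == prod
-- ===== Notes on version B (the rewrite author's own statement) =====
-- stated objective: idiomatic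
-- what changed: B derives the digits from the decimal string representation (most-significant-first), with a guard for nonpositive inputs, instead of A's arithmetic mod/div accumulator loop.
import Mathlib
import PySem

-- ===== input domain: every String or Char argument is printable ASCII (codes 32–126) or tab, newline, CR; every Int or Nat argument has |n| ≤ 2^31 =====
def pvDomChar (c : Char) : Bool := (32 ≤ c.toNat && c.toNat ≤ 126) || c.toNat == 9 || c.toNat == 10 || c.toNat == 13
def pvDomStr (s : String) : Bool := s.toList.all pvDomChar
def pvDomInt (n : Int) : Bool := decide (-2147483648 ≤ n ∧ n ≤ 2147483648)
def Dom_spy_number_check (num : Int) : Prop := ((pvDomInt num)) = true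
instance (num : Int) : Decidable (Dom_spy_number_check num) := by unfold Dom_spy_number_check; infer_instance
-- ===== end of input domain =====

-- B re-implements the check from the decimal string representation (most-significant-first)
-- instead of A's arithmetic mod/div accumulator loop; objective: idiomatic, no speed claim.

-- ===== PORT A =====
-- the while-loop of A, state (num, y, d)
def spyLoop (num y d : Int) : Int × Int :=
  if 0 < num then
    spyLoop (PySem.Int.floordiv num 10) (PySem.Int.mod num 10 + y) (d * PySem.Int.mod num 10)
  else (y, d)
termination_by num.toNat
decreasing_by
  rw [PySem.Int.floordiv_eq_ediv_of_pos (by norm_num)]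
  omega

def spy_number_check (num : Int) : Bool :=
  let p := spyLoop num 0 1
  if p.1 = p.2 then true else false

-- ===== PORT B =====
-- int(c) for a single decimal digit character c (exact there; str(num) for num > 0
-- consists only of such characters)
def digitInt (c : Char) : Int := (c.toNat : Int) - 48

def spy_number_check_alt (num : Int) : Bool :=
  if num ≤ 0 then false
  else
    let cs := PySem.Int.toChars num          -- str(num)
    let total := (cs.map digitInt).sum       -- sum(int(c) for c in s)
    let prod := cs.foldl (fun p c => p * digitInt c) 1   -- for c in s: prod *= int(c)
    total == prod

-- ===== PRECONDITION & SPEC =====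
def Spec_spy_number_check (num : Int) (out : Bool) : Prop := out = spy_number_check_alt num
instance (num : Int) (out : Bool) : Decidable (Spec_spy_number_check num out) := by unfold Spec_spy_number_check; infer_instance

-- ===== CLAIM (what is proved, stated in full; the proofs are below) =====
def Claim_equal_spy_number_check : Prop := ∀ (num : Int), Dom_spy_number_check num → Spec_spy_number_check num (spy_number_check num)

-- ===== LEMMAS AND PROOFS =====

-- A's loop computes the sum and product of the decimal digits (little-endian `Nat.digits`).
theorem spyLoop_digits (n : Nat) : ∀ y d : Int,
    spyLoop (n : Int) y d =
      (((Nat.digits 10 n).map (Int.ofNat)).sum + y,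
       d * ((Nat.digits 10 n).map (Int.ofNat)).prod) := by
  induction n using Nat.strong_induction_on with
  | _ n ih =>
    intro y d
    rw [spyLoop]
    by_cases hn : 0 < n
    · have h10 : (0 : Int) < 10 := by norm_num
      simp only [show (0:Int) < (n:Int) from by exact_mod_cast hn]
      rw [show PySem.Int.floordiv (n : Int) 10 = ((n / 10 : Nat) : Int) from by
            exact_mod_cast PySem.Int.floordiv_natCast n 10,
          show PySem.Int.mod (n : Int) 10 = ((n % 10 : Nat) : Int) from by
            exact_mod_cast PySem.Int.mod_natCast n 10]
      rw [ih (n / 10) (by omega)]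
      rw [Nat.digits_def' (by norm_num) hn]
      simp only [List.map_cons, List.sum_cons, List.prod_cons, if_true, Prod.mk.injEq]
      exact ⟨by push_cast [Int.ofNat_eq_natCast]; ring, by push_cast [Int.ofNat_eq_natCast]; ring⟩
    · have h0 : n = 0 := by omega
      subst h0
      simp

-- `Nat.toDigitsCore` (the engine of `str`) produces the digits of `Nat.digits` in reverse,
-- rendered as characters.
theorem toDigitsCore_digits : ∀ (fuel n : Nat) (acc : List Char), 0 < n → n < fuel →
    Nat.toDigitsCore 10 fuel n acc =
      ((Nat.digits 10 n).reverse.map Nat.digitChar) ++ acc := by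
  intro fuel
  induction fuel with
  | zero => intro n acc h hf; omega
  | succ fuel ih =>
    intro n acc hn hf
    rw [Nat.toDigitsCore]
    by_cases hq : n / 10 = 0
    · have hlt : n < 10 := by omega
      rw [if_pos hq]
      rw [Nat.digits_def' (by norm_num) hn, hq]
      simp [Nat.mod_eq_of_lt hlt]
    · rw [if_neg hq]
      rw [ih (n / 10) _ (by omega) (by omega)]
      rw [Nat.digits_def' (by norm_num) hn]
      simp

theorem digitInt_digitChar (d : Nat) (h : d < 10) :
    digitInt (Nat.digitChar d) = (d : Int) := by
  interval_cases d <;> decide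

-- For positive n, `int(c)` mapped over `str(n)` is the reversed digit list, as integers.
theorem map_digitInt_toChars (n : Nat) (hn : 0 < n) :
    (PySem.Int.toChars (n : Int)).map digitInt =
      (Nat.digits 10 n).reverse.map (Int.ofNat) := by
  rw [show PySem.Int.toChars (n : Int) = Nat.toDigits 10 n from by
        simp [PySem.Int.toChars, show ¬((n:Int) < 0) from by omega]]
  rw [Nat.toDigits, toDigitsCore_digits (n + 1) n [] hn (by omega)]
  simp only [List.append_nil, List.map_map]
  refine List.map_congr_left ?_
  intro d hd
  have : d < 10 := Nat.digits_lt_base (by norm_num) (by simpa using hd)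
  simp [Function.comp, digitInt_digitChar d this]

-- ===== VERDICT (by name: the statement is the Claim_ definition above) =====
theorem spy_number_check_spec : Claim_equal_spy_number_check := by
  intro num _
  unfold Spec_spy_number_check spy_number_check spy_number_check_alt
  by_cases hle : num ≤ 0
  · rw [spyLoop]
    simp [show ¬(0 < num) from by omega, hle]
  · have hpos : 0 < num := by omega
    obtain ⟨n, rfl⟩ : ∃ n : Nat, num = (n : Int) := ⟨num.toNat, by omega⟩
    have hn : 0 < n := by exact_mod_cast hpos
    have hfold : List.foldl (fun p c => p * digitInt c) 1 (PySem.Int.toChars (n : Int))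
        = ((Nat.digits 10 n).map (Int.ofNat)).prod := by
      rw [← List.foldl_map, map_digitInt_toChars n hn, ← List.prod_eq_foldl,
        List.map_reverse, List.prod_reverse]
    have hne : n ≠ 0 := by omega
    simp [spyLoop_digits n 0 1, map_digitInt_toChars n hn, hfold, List.map_reverse,
      List.sum_reverse, hne]
    rfl
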